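-- pv_equiv track=rewrite | github.com/XiamiYoung/xiami_seckill_backend | xiami_seckill_backend/src/utils/util.py | parse_cart_item_array
-- ===== SOURCE A (Python) =====
-- def parse_cart_item_array(original):
--     item_array = original.split(',')
--
--     id_array = []
--
--     for item in item_array:
--         if item.startswith('"id":'):
--             begin = item.find(':') + 1
--             end = len(item)
--             item_parsed = item[begin:end]
--             id_array.append(item_parsed)
--
--     return id_array
-- ===== SOURCE B (Python) =====
-- def parse_cart_item_array(original):
--     # single pass with str.partition: peel one comma-delimited token at a time,
--     # never materializing the full token list
--     ids = []
--     rest = original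
--     while True:
--         head, sep, rest2 = rest.partition(',')
--         if head.startswith('"id":'):
--             ids.append(head[5:])
--         if not sep:
--             return ids
--         rest = rest2
-- ===== Notes on version B (the rewrite author's own statement) =====
-- stated objective: alternative
-- what changed: B drops the split-into-a-full-token-list plus filter loop and instead peels one comma-delimited token at a time with str.partition, appending the token's tail after the 5-char id marker whenever the token begins with that marker (no intermediate token list, no per-token find call).
import Mathlib
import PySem

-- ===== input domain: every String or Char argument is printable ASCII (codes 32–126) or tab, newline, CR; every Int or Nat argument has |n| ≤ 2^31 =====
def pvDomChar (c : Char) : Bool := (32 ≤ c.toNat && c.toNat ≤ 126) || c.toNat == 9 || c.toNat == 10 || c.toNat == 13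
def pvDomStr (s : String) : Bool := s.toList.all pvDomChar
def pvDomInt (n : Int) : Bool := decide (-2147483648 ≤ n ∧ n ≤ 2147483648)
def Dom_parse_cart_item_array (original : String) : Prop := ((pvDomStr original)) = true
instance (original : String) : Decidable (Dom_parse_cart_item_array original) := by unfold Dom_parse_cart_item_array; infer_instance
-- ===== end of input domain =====

-- B replaces split-into-a-list + filter loop by a partition-based scan that peels one
-- comma-delimited token at a time (objective: alternative; same O(n) cost).

-- ===== PORT A =====
-- A: item_array = original.split(','); for each item that startswith '"id":',
-- append item[item.find(':')+1 : len(item)].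
def parse_cart_item_array (original : String) : List String :=
  let item_array := PySem.Chars.splitOn original.toList (",".toList)
  (item_array.foldl (fun id_array item =>
      if PySem.Chars.startswith item ("\"id\":".toList) then
        let b := PySem.Chars.find item (":".toList) + 1
        let e := (item.length : Int)
        id_array ++ [PySem.Chars.slice item (some b) (some e)]
      else id_array) []).map String.ofList

-- ===== PORT B =====
-- B's loop body: head, sep, rest2 = rest.partition(','). str.partition(',') is ported by
-- hand (exact, since the separator is the single char ','): head = takeWhile (· ≠ ','),
-- sep is nonempty iff ',' ∈ rest, and rest2 = tail of dropWhile (· ≠ ',').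
def pvBGo (rest : List Char) (ids : List (List Char)) : List (List Char) :=
  let head := rest.takeWhile (· ≠ ',')
  let ids' := if PySem.Chars.startswith head ("\"id\":".toList)
              then ids ++ [PySem.Chars.slice head (some 5) none] else ids
  if ',' ∈ rest then pvBGo ((rest.dropWhile (· ≠ ',')).tail) ids' else ids'
termination_by rest.length
decreasing_by
  rename_i h
  have hne : rest.dropWhile (fun c => decide (c ≠ ',')) ≠ [] := by
    simp [List.dropWhile_eq_nil_iff]; exact h
  have h2 := List.length_dropWhile_le (fun c => decide (c ≠ ',')) rest
  cases hd : rest.dropWhile (fun c => decide (c ≠ ',')) with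
  | nil => exact absurd hd hne
  | cons a tl =>
    rw [hd] at h2
    simp only [hd, List.tail_cons, List.length_cons] at *
    omega

def parse_cart_item_array_alt (original : String) : List String :=
  (pvBGo original.toList []).map String.ofList

-- ===== PRECONDITION & SPEC =====
def Spec_parse_cart_item_array (original : String) (out : List String) : Prop := out = parse_cart_item_array_alt original
instance (original : String) (out : List String) : Decidable (Spec_parse_cart_item_array original out) := by unfold Spec_parse_cart_item_array; infer_instance

-- ===== CLAIM (what is proved, stated in full; the proofs are below) =====
def Claim_equal_parse_cart_item_array : Prop := ∀ (original : String), Dom_parse_cart_item_array original → Spec_parse_cart_item_array original (parse_cart_item_array original)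

-- ===== LEMMAS AND PROOFS =====

-- Reference splitter: Python's split(',') written in the same peel-one-token shape as pvBGo.
def pvSplitC (cs : List Char) : List (List Char) :=
  if ',' ∈ cs then cs.takeWhile (· ≠ ',') :: pvSplitC ((cs.dropWhile (· ≠ ',')).tail)
  else [cs]
termination_by cs.length
decreasing_by
  rename_i h
  have hne : cs.dropWhile (fun c => decide (c ≠ ',')) ≠ [] := by
    simp [List.dropWhile_eq_nil_iff]; exact h
  have h2 := List.length_dropWhile_le (fun c => decide (c ≠ ',')) cs
  cases hd : cs.dropWhile (fun c => decide (c ≠ ',')) with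
  | nil => exact absurd hd hne
  | cons a tl =>
    rw [hd] at h2
    simp only [hd, List.tail_cons, List.length_cons] at *
    omega

lemma pvSplitC_nil : pvSplitC [] = [[]] := by rw [pvSplitC]; simp

lemma pvSplitC_comma (rest : List Char) : pvSplitC (',' :: rest) = [] :: pvSplitC rest := by
  rw [pvSplitC]; simp [List.takeWhile_cons, List.dropWhile_cons]

lemma pvSplitC_cons (c : Char) (rest : List Char) (hc : c ≠ ',') :
    pvSplitC (c :: rest) = (pvSplitC rest).modifyHead (c :: ·) := by
  have hnc : (',' ∈ (c :: rest)) = (',' ∈ rest) := by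
    simp [List.mem_cons]; intro h; exact absurd h.symm hc
  by_cases hm : ',' ∈ rest
  · rw [pvSplitC]; conv_rhs => rw [pvSplitC]
    simp [List.takeWhile_cons, List.dropWhile_cons, hc, hm, hnc]
  · rw [pvSplitC]; conv_rhs => rw [pvSplitC]
    simp [hnc, hm]

lemma pvGo_spec (fuel : Nat) : ∀ (l cur : List Char) (accs : List (List Char)),
    l.length < fuel →
    PySem.Chars.splitOn.go [','] fuel l cur accs =
      accs.reverse ++ (pvSplitC l).modifyHead (cur.reverse ++ ·) := by
  induction fuel with
  | zero => intro l cur accs h; omega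
  | succ n ih =>
    intro l cur accs h
    match l with
    | [] => simp [PySem.Chars.splitOn.go, pvSplitC_nil]
    | c :: rest =>
      by_cases hc : c = ','
      · subst hc
        simp only [PySem.Chars.splitOn.go, List.isPrefixOf, BEq.rfl, Bool.true_and, if_true,
          List.length_cons, List.length_nil, List.drop_succ_cons, List.drop_zero]
        rw [ih rest [] _ (by simpa using h), pvSplitC_comma]
        cases pvSplitC rest <;> simp
      · simp only [PySem.Chars.splitOn.go]
        rw [if_neg (by simp [List.isPrefixOf]; exact fun h' => hc h'.symm),
          ih rest (c :: cur) accs (by simpa using h), pvSplitC_cons c rest hc]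
        cases hs : pvSplitC rest with
        | nil => simp
        | cons hd tl => simp

lemma pvSplitOn_eq (cs : List Char) : PySem.Chars.splitOn cs (",".toList) = pvSplitC cs := by
  show PySem.Chars.splitOn.go [','] (cs.length + 1) cs [] [] = _
  rw [pvGo_spec (cs.length + 1) cs [] [] (by omega)]
  cases hs : pvSplitC cs <;> simp

lemma pvFind_marker (t : List Char) :
    PySem.Chars.find ('"'::'i'::'d'::'"'::':'::t) [':'] = 4 := by
  simp [PySem.Chars.find, PySem.Chars.find.go, List.isPrefixOf]

-- On a token that starts with '"id":', A's item[item.find(':')+1 : len(item)] is B's head[5:].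
lemma pvToken_eq (ids : List (List Char)) (item : List Char) :
    (if PySem.Chars.startswith item ("\"id\":".toList) then
        ids ++ [PySem.Chars.slice item (some (PySem.Chars.find item (":".toList) + 1)) (some (item.length : Int))]
      else ids) =
    (if PySem.Chars.startswith item ("\"id\":".toList) then
        ids ++ [PySem.Chars.slice item (some 5) none] else ids) := by
  cases hp : PySem.Chars.startswith item ("\"id\":".toList) with
  | false => simp [hp]
  | true =>
    obtain ⟨t, rfl⟩ : ∃ t, item = '"'::'i'::'d'::'"'::':'::t := by
      obtain ⟨t, ht⟩ := (PySem.Chars.startswith_iff item _).mp hp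
      exact ⟨t, ht.symm⟩
    simp only [if_true, List.append_cancel_left_eq, List.cons.injEq, and_true]
    have hf : PySem.Chars.find ('\"'::'i'::'d'::'\"'::':'::t) (":".toList) = 4 := pvFind_marker t
    rw [hf]
    show PySem.List.slice _ (some 5) (some _) = PySem.List.slice _ (some 5) none
    simp [pysem]
    rw [show ((t.length : Int) + 1 + 1 + 1 + 1 + 1) = ((t.length + 5 : Nat) : Int) by push_cast; ring,
      show ((5 : Int)) = ((5 : Nat) : Int) by norm_num, PySem.List.slice_natCast]
    simp

lemma pvDropTail_lt (cs : List Char) (h : ',' ∈ cs) :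
    ((cs.dropWhile (· ≠ ',')).tail).length < cs.length := by
  have hne : cs.dropWhile (fun c => decide (c ≠ ',')) ≠ [] := by
    simp [List.dropWhile_eq_nil_iff]; exact h
  have h2 := List.length_dropWhile_le (fun c => decide (c ≠ ',')) cs
  cases hd : cs.dropWhile (fun c => decide (c ≠ ',')) with
  | nil => exact absurd hd hne
  | cons a tl =>
    rw [hd] at h2
    simp only [hd, List.tail_cons, List.length_cons] at *
    omega

lemma pvTakeWhile_all (cs : List Char) (h : ',' ∉ cs) : cs.takeWhile (· ≠ ',') = cs := by
  induction cs with
  | nil => rfl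
  | cons a tl ih =>
    simp only [List.mem_cons, not_or] at h
    have ha : a ≠ ',' := fun he => h.1 he.symm
    simp [List.takeWhile_cons, ha, ih h.2]
    intro x hx he
    exact h.2 (he ▸ hx)

lemma pvFold_eq_bGo : ∀ (n : Nat) (cs : List Char) (ids : List (List Char)), cs.length ≤ n →
    (pvSplitC cs).foldl (fun id_array item =>
      if PySem.Chars.startswith item ("\"id\":".toList) then
        id_array ++ [PySem.Chars.slice item (some (PySem.Chars.find item (":".toList) + 1)) (some (item.length : Int))]
      else id_array) ids = pvBGo cs ids := by
  intro n
  induction n with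
  | zero =>
    intro cs ids hn
    have hc : cs = [] := by cases cs <;> simp_all
    subst hc
    rw [pvSplitC_nil, pvBGo]
    simp [PySem.Chars.startswith, List.isPrefixOf]
  | succ m ih =>
    intro cs ids hn
    by_cases hm : ',' ∈ cs
    · rw [pvSplitC, if_pos hm, List.foldl_cons]
      conv_rhs => rw [pvBGo]
      rw [if_pos hm]
      rw [pvToken_eq]
      exact ih _ _ (by have := pvDropTail_lt cs hm; omega)
    · rw [pvSplitC, if_neg hm]
      conv_rhs => rw [pvBGo]
      rw [if_neg hm, List.foldl_cons, List.foldl_nil, pvToken_eq, pvTakeWhile_all cs hm]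

-- ===== VERDICT (by name: the statement is the Claim_ definition above) =====
theorem parse_cart_item_array_spec : Claim_equal_parse_cart_item_array := by
  intro s _
  show _ = _
  unfold parse_cart_item_array parse_cart_item_array_alt
  rw [pvSplitOn_eq]
  exact congrArg (List.map String.ofList) (pvFold_eq_bGo s.toList.length s.toList [] le_rfl)
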